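-- pv_equiv track=rewrite | github.com/biobotus/platform_control | scripts/trajectory.py | getIDX
-- ===== SOURCE A (Python) =====
-- def getIDX(array):
--     """Get the start index and the end index of the smallest consecutive pulse if any"""
--
--     index_low = []
--     index_high = []
--
--     len_array = len(array)
--     ctr = 0
--     detected = False
--
--
--
--     min_nb = min(array)
--
--     if array.count(min_nb) < 6:
--         return [index_low, index_high]
--
--     ctr = 0
--     for i in range(len(array)):
--         if ctr == 0 and array[i] == min_nb:
--             index_low_dummy = i
--             ctr = ctr + 1
--
--         if ctr and array[i] == min_nb:
--             index_high_dummy = i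
--
--     index_low.append(index_low_dummy)
--     index_high.append(index_high_dummy)
--
--     return [index_low, index_high]
-- ===== SOURCE B (Python) =====
-- def getIDX(array):
--     """Get the start index and the end index of the smallest consecutive pulse if any"""
--     m = array[0]
--     cnt = 0
--     first = 0
--     last = 0
--     for i, x in enumerate(array):
--         if x < m:
--             m, cnt, first, last = x, 1, i, i
--         elif x == m:
--             cnt += 1
--             last = i
--     if cnt < 6:
--         return [[], []]
--     return [[first], [last]]
-- ===== Notes on version B (the rewrite author's own statement) =====
-- stated objective: alternative
-- what changed: Replaces A's three staged passes (min(), count(), then a flag-tracking index loop) by ONE streaming pass over enumerate(array) that maintains (running min, its count, first index, last index) in an accumulator, restarting the triple whenever a new minimum appears; the count guard moves after the pass.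
import Mathlib
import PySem

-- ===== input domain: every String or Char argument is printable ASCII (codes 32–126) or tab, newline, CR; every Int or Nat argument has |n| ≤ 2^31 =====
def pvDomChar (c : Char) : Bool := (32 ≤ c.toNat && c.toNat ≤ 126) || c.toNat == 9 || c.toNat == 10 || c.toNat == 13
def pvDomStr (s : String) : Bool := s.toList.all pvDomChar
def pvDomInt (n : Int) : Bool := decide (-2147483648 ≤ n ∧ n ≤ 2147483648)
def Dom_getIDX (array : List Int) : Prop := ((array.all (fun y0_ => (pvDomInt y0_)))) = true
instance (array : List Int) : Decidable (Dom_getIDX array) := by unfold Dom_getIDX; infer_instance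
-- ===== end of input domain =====

-- B replaces A's staged passes (min, count, flag-tracking index loop) by ONE streaming pass
-- over enumerate(array) keeping (running min, its count, first index, last index); alternative decomposition.

-- ===== PORT A =====
-- the body of A's for-loop: state = (ctr, index_low_dummy, index_high_dummy)
def getIDXstep (min_nb : Int) (st : Int × Int × Int) (i : Int) (x : Int) : Int × Int × Int :=
  let st1 := if st.1 == 0 && x == min_nb then (st.1 + 1, i, st.2.2) else st
  if st1.1 != 0 && x == min_nb then (st1.1, st1.2.1, i) else st1

def getIDX (array : List Int) : List (List Int) :=
  let min_nb := (PySem.List.min? array (fun x => x)).getD 0   -- min(array); Pre_ excludes [], so the getD default is never taken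
  if PySem.List.count array min_nb < 6 then [[], []]
  else
    -- for i in range(len(array)): … array[i] … ; the dummies start at 0 (they are always assigned in this branch)
    let st := (PySem.List.pyRange 0 (array.length : Int) 1).foldl
      (fun st i => getIDXstep min_nb st i (PySem.List.pyGetD array i 0)) (0, 0, 0)
    [[st.2.1], [st.2.2]]

-- ===== PORT B =====
-- body of B's single for-loop: state = (m, cnt, first, last)
def getIDXaltStep (st : Int × Int × Int × Int) (i : Int) (x : Int) : Int × Int × Int × Int :=
  if x < st.1 then (x, 1, i, i)
  else if x == st.1 then (st.1, st.2.1 + 1, st.2.2.1, i)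
  else st

def getIDX_alt (array : List Int) : List (List Int) :=
  let m0 := PySem.List.pyGetD array 0 0   -- array[0]; Pre_ excludes [], so the default is never taken
  let st := (PySem.List.enumerate array 0).foldl (fun st p => getIDXaltStep st p.1 p.2) (m0, 0, 0, 0)
  if st.2.1 < 6 then [[], []] else [[st.2.2.1], [st.2.2.2]]

-- ===== PRECONDITION & SPEC =====
-- Pre_ excludes only the empty list, on which A's min(array) raises ValueError (and B's array[0] raises IndexError).
def Pre_getIDX (array : List Int) : Prop := array ≠ []
instance (array : List Int) : Decidable (Pre_getIDX array) := by unfold Pre_getIDX; infer_instance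
def pvWitness_getIDX : List Int := [1, 1, 1, 1, 1, 1, 2]

def Spec_getIDX (array : List Int) (out : List (List Int)) : Prop := out = getIDX_alt array
instance (array : List Int) (out : List (List Int)) : Decidable (Spec_getIDX array out) := by unfold Spec_getIDX; infer_instance

-- ===== CLAIM (what is proved, stated in full; the proofs are below) =====
def Claim_equal_getIDX : Prop := ∀ (array : List Int), Dom_getIDX array → Pre_getIDX array → Spec_getIDX array (getIDX array)

-- ===== LEMMAS AND PROOFS =====

def pvLastIdx (v : Int) (ys : List Int) : Nat := ys.length - 1 - (PySem.List.index? ys.reverse v).getD 0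

theorem pv_last_cons_mem (v y : Int) (ys : List Int) (h : v ∈ ys) :
    pvLastIdx v (y :: ys) = pvLastIdx v ys + 1 := by
  have hm : v ∈ ys.reverse := by simpa using h
  have h1 : PySem.List.index? ((y :: ys).reverse) v = PySem.List.index? ys.reverse v := by
    rw [List.reverse_cons]; exact PySem.List.index?_append_of_mem _ hm
  obtain ⟨k, hk⟩ := Option.isSome_iff_exists.mp ((PySem.List.index?_isSome_iff _ _).mpr hm)
  have hlt : k < ys.reverse.length := (PySem.List.getElem_of_index?_eq_some hk).1
  simp only [pvLastIdx, h1, hk, List.length_cons, Option.getD_some]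
  simp at hlt
  omega

theorem pv_last_cons_self (v : Int) (ys : List Int) (h : v ∉ ys) :
    pvLastIdx v (v :: ys) = 0 := by
  have h1 : PySem.List.index? ((v :: ys).reverse) v = some ys.reverse.length := by
    rw [List.reverse_cons]
    exact PySem.List.index?_append_singleton_self ys.reverse v (by simpa using h)
  simp only [pvLastIdx, h1, List.length_cons, Option.getD_some, List.length_reverse]
  omega

theorem pv_loop_seen (v l : Int) :
    ∀ (ys : List Int) (a h : Int),
      (PySem.List.enumerate ys a).foldl (fun st p => getIDXstep v st p.1 p.2) (1, l, h)
        = (1, l, if v ∈ ys then a + (pvLastIdx v ys : Int) else h) := by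
  intro ys
  induction ys with
  | nil => intro a h; simp [PySem.List.enumerate]
  | cons y ys ih =>
    intro a h
    rw [PySem.List.enumerate_cons, List.foldl_cons]
    by_cases hy : y = v
    · have hs : getIDXstep v (1, l, h) a y = (1, l, a) := by simp [getIDXstep, hy]
      rw [hs, ih]
      by_cases hm : v ∈ ys
      · simp [hm, hy, pv_last_cons_mem v v ys hm]; omega
      · simp [hm, hy, pv_last_cons_self v ys hm]
    · have hs : getIDXstep v (1, l, h) a y = (1, l, h) := by simp [getIDXstep, hy]
      rw [hs, ih]
      by_cases hm : v ∈ ys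
      · simp [hm, pv_last_cons_mem v y ys hm]; omega
      · simp [hm, Ne.symm hy]

theorem pv_loop_unseen (v l h : Int) :
    ∀ (ys : List Int) (a : Int),
      (PySem.List.enumerate ys a).foldl (fun st p => getIDXstep v st p.1 p.2) (0, l, h)
        = if v ∈ ys then (1, a + ((PySem.List.index? ys v).getD 0 : Int), a + (pvLastIdx v ys : Int))
          else (0, l, h) := by
  intro ys
  induction ys with
  | nil => intro a; simp [PySem.List.enumerate]
  | cons y ys ih =>
    intro a
    rw [PySem.List.enumerate_cons, List.foldl_cons]
    by_cases hy : y = v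
    · have hs : getIDXstep v (0, l, h) a y = (1, a, a) := by simp [getIDXstep, hy]
      rw [hs, pv_loop_seen]
      have h0 : PySem.List.index? (y :: ys) v = some 0 := by rw [hy]; exact PySem.List.index?_cons_self _ _
      simp only [PySem.List.index?_eq_idxOf?] at h0
      by_cases hm : v ∈ ys
      · simp [hm, hy, pv_last_cons_mem v v ys hm, hy ▸ h0]; omega
      · simp [hm, hy, pv_last_cons_self v ys hm, hy ▸ h0]
    · have hs : getIDXstep v (0, l, h) a y = (0, l, h) := by simp [getIDXstep, hy]
      rw [hs, ih]
      by_cases hm : v ∈ ys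
      · obtain ⟨k, hk⟩ := Option.isSome_iff_exists.mp ((PySem.List.index?_isSome_iff _ _).mpr hm)
        have h2 : PySem.List.index? (y :: ys) v = some (k + 1) := by
          rw [PySem.List.index?_cons_of_ne _ hy, hk]; rfl
        simp only [PySem.List.index?_eq_idxOf?] at hk h2
        simp [hm, hk, h2, pv_last_cons_mem v y ys hm]
        omega
      · simp [hm, Ne.symm hy]

theorem pv_enum_bridge {σ : Type} (f : σ → Int → Int → σ) (full : List Int) :
    ∀ (xs : List Int) (a : ℕ) (init : σ),
      (∀ k (hk : k < xs.length), PySem.List.pyGetD full ((a : Int) + k) 0 = xs[k]) →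
      (PySem.List.pyRange (a : Int) ((a : Int) + xs.length) 1).foldl
          (fun st i => f st i (PySem.List.pyGetD full i 0)) init
        = (PySem.List.enumerate xs (a : Int)).foldl (fun st p => f st p.1 p.2) init := by
  intro xs
  induction xs with
  | nil => intro a init _; simp [PySem.List.pyRange_one_eq_nil, PySem.List.enumerate]
  | cons x xs ih =>
    intro a init hget
    rw [PySem.List.pyRange_one_cons (by simp only [List.length_cons]; push_cast; omega),
        List.foldl_cons, PySem.List.enumerate_cons, List.foldl_cons]
    have h0 : PySem.List.pyGetD full (a : Int) 0 = x := by
      simpa using hget 0 (by simp)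
    rw [h0]
    have hrec := ih (a + 1) (f init (a : Int) x)
      (by intro k hk
          have h1 := hget (k + 1) (by simp only [List.length_cons]; omega)
          push_cast at h1 ⊢
          rw [show ((a : Int) + 1 + (k : Int)) = (a : Int) + ((k : Int) + 1) by ring]
          simpa using h1)
    push_cast at hrec
    rw [show ((a : Int) + (((x :: xs).length : ℕ) : Int)) = ((a : Int) + 1) + (xs.length : Int) by
          simp only [List.length_cons]; push_cast; ring]
    exact hrec

-- characterization of A on nonempty input
theorem getIDX_char (x : Int) (xs : List Int) :
    getIDX (x :: xs) =
      (if List.count (xs.foldl min x) (x :: xs) < 6 then [[], []]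
       else [[(((PySem.List.index? (x :: xs) (xs.foldl min x)).getD 0 : Nat) : Int)],
             [((pvLastIdx (xs.foldl min x) (x :: xs) : Nat) : Int)]]) := by
  simp only [getIDX]
  have hmin : (PySem.List.min? (x :: xs) (fun y => y)).getD 0 = xs.foldl min x := by
    rw [PySem.List.min?_id_cons]; rfl
  rw [hmin]
  set v := xs.foldl min x with hv
  simp only [PySem.List.count_eq]
  by_cases hc : List.count v (x :: xs) < 6
  · rw [if_pos hc, if_pos hc]
  · rw [if_neg hc, if_neg hc]
    have hmem : v ∈ (x :: xs) := List.count_pos_iff.mp (by omega)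
    have hb := pv_enum_bridge (fun st i y => getIDXstep v st i y) (x :: xs) (x :: xs) 0 (0, 0, 0)
      (by intro k hk
          simp [PySem.List.pyGetD_eq_getElem, hk]
          rw [List.getElem?_eq_getElem hk]; rfl)
    simp only [Nat.cast_zero, zero_add] at hb
    rw [hb, pv_loop_unseen]
    simp [hmem]

-- running-min helpers
theorem pv_foldl_min_le (m : Int) : ∀ (ys : List Int), ys.foldl min m ≤ m := by
  intro ys
  induction ys generalizing m with
  | nil => simp
  | cons y ys ih =>
    rw [List.foldl_cons]
    exact le_trans (ih (min m y)) (min_le_left m y)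

theorem pv_foldl_min_mem_or (m : Int) : ∀ (ys : List Int), ys.foldl min m = m ∨ ys.foldl min m ∈ ys := by
  intro ys
  induction ys generalizing m with
  | nil => simp
  | cons y ys ih =>
    rw [List.foldl_cons]
    rcases ih (min m y) with h | h
    · rcases min_choice m y with hm | hm
      · exact Or.inl (h.trans hm)
      · exact Or.inr (by rw [h, hm]; exact List.mem_cons_self)
    · exact Or.inr (List.mem_cons_of_mem _ h)

-- characterization of B's single-pass fold
theorem pv_alt_fold :
    ∀ (ys : List Int) (a m c f l : Int),
      (PySem.List.enumerate ys a).foldl (fun st p => getIDXaltStep st p.1 p.2) (m, c, f, l)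
        = if ys.foldl min m < m then
            (ys.foldl min m, (List.count (ys.foldl min m) ys : Int),
             a + ((PySem.List.index? ys (ys.foldl min m)).getD 0 : Int),
             a + (pvLastIdx (ys.foldl min m) ys : Int))
          else if m ∈ ys then
            (m, c + (List.count m ys : Int), f, a + (pvLastIdx m ys : Int))
          else (m, c, f, l) := by
  intro ys
  induction ys with
  | nil => intro a m c f l; simp [PySem.List.enumerate]
  | cons y ys ih =>
    intro a m c f l
    rw [PySem.List.enumerate_cons, List.foldl_cons]
    rcases lt_trichotomy y m with hy | hy | hy
    · -- y < m : restart the triple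
      have hs : getIDXaltStep (m, c, f, l) a y = (y, 1, a, a) := by
        simp [getIDXaltStep, hy]
      rw [hs, ih, List.foldl_cons, min_eq_right hy.le]
      have hwle : ys.foldl min y ≤ y := pv_foldl_min_le y ys
      have hwor := pv_foldl_min_mem_or y ys
      generalize hw : ys.foldl min y = w at hwle hwor ⊢
      rcases lt_or_eq_of_le hwle with hlt | heq
      · have hmem : w ∈ ys := hwor.resolve_left (by omega)
        have hne : y ≠ w := by omega
        obtain ⟨k, hk⟩ := Option.isSome_iff_exists.mp ((PySem.List.index?_isSome_iff _ _).mpr hmem)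
        have h2 : PySem.List.index? (y :: ys) w = some (k + 1) := by
          rw [PySem.List.index?_cons_of_ne _ hne, hk]; rfl
        simp only [PySem.List.index?_eq_idxOf?] at hk h2
        rw [if_pos hlt, if_pos (hlt.trans hy)]
        simp [List.count_cons, Ne.symm hne, hk, h2, pv_last_cons_mem w y ys hmem]
        omega
      · subst heq
        rw [if_neg (lt_irrefl w), if_pos hy]
        have h0 : PySem.List.index? (w :: ys) w = some 0 := PySem.List.index?_cons_self _ _
        simp only [PySem.List.index?_eq_idxOf?] at h0
        by_cases hm : w ∈ ys
        · rw [if_pos hm]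
          simp [List.count_cons, h0, pv_last_cons_mem w w ys hm]
          omega
        · rw [if_neg hm]
          simp [List.count_cons, h0, pv_last_cons_self w ys hm,
                List.count_eq_zero_of_not_mem hm]
    · -- y = m : count it, update last
      subst hy
      have hs : getIDXaltStep (y, c, f, l) a y = (y, c + 1, f, a) := by
        simp [getIDXaltStep]
      rw [hs, ih, List.foldl_cons, min_self]
      have hwle : ys.foldl min y ≤ y := pv_foldl_min_le y ys
      have hwor := pv_foldl_min_mem_or y ys
      generalize hw : ys.foldl min y = w at hwle hwor ⊢
      rcases lt_or_eq_of_le hwle with hlt | heq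
      · have hmem : w ∈ ys := hwor.resolve_left (by omega)
        have hne : y ≠ w := by omega
        obtain ⟨k, hk⟩ := Option.isSome_iff_exists.mp ((PySem.List.index?_isSome_iff _ _).mpr hmem)
        have h2 : PySem.List.index? (y :: ys) w = some (k + 1) := by
          rw [PySem.List.index?_cons_of_ne _ hne, hk]; rfl
        simp only [PySem.List.index?_eq_idxOf?] at hk h2
        rw [if_pos hlt, if_pos hlt]
        simp [List.count_cons, Ne.symm hne, hk, h2, pv_last_cons_mem w y ys hmem]
        omega
      · subst heq
        rw [if_neg (lt_irrefl w), if_neg (lt_irrefl w), if_pos List.mem_cons_self]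
        by_cases hm : w ∈ ys
        · rw [if_pos hm]
          simp [List.count_cons, pv_last_cons_mem w w ys hm]
          omega
        · rw [if_neg hm]
          simp [List.count_cons, pv_last_cons_self w ys hm,
                List.count_eq_zero_of_not_mem hm]
    · -- y > m : state unchanged
      have hs : getIDXaltStep (m, c, f, l) a y = (m, c, f, l) := by
        have h1 : ¬ y < m := by omega
        have h2 : (y == m) = false := by simp; omega
        simp [getIDXaltStep, h1, h2]
      rw [hs, ih, List.foldl_cons, min_eq_left hy.le]
      have hvle : ys.foldl min m ≤ m := pv_foldl_min_le m ys
      have hvor := pv_foldl_min_mem_or m ys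
      generalize hv : ys.foldl min m = v at hvle hvor ⊢
      rcases lt_or_eq_of_le hvle with hlt | heq
      · have hmem : v ∈ ys := hvor.resolve_left (by omega)
        have hne : y ≠ v := by omega
        obtain ⟨k, hk⟩ := Option.isSome_iff_exists.mp ((PySem.List.index?_isSome_iff _ _).mpr hmem)
        have h2 : PySem.List.index? (y :: ys) v = some (k + 1) := by
          rw [PySem.List.index?_cons_of_ne _ hne, hk]; rfl
        simp only [PySem.List.index?_eq_idxOf?] at hk h2
        rw [if_pos hlt, if_pos hlt]
        simp [List.count_cons, Ne.symm hne, hk, h2, pv_last_cons_mem v y ys hmem]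
        omega
      · subst heq
        rw [if_neg (lt_irrefl v), if_neg (lt_irrefl v)]
        by_cases hm : v ∈ ys
        · have hne : y ≠ v := by omega
          rw [if_pos hm, if_pos (List.mem_cons_of_mem _ hm)]
          simp [List.count_cons, Ne.symm hne, pv_last_cons_mem v y ys hm]
          omega
        · have hm2 : v ∉ y :: ys := by
            simp only [List.mem_cons, not_or]
            exact ⟨by omega, hm⟩
          rw [if_neg hm, if_neg hm2]

theorem getIDX_alt_char (x : Int) (xs : List Int) :
    getIDX_alt (x :: xs) =
      (if List.count (xs.foldl min x) (x :: xs) < 6 then [[], []]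
       else [[(((PySem.List.index? (x :: xs) (xs.foldl min x)).getD 0 : Nat) : Int)],
             [((pvLastIdx (xs.foldl min x) (x :: xs) : Nat) : Int)]]) := by
  simp only [getIDX_alt]
  have hm0 : PySem.List.pyGetD (x :: xs) 0 0 = x := by
    simp [PySem.List.pyGetD_eq_getElem]
  rw [hm0, pv_alt_fold, List.foldl_cons, min_self]
  have hvle : xs.foldl min x ≤ x := pv_foldl_min_le x xs
  generalize hv : xs.foldl min x = v at hvle ⊢
  rcases lt_or_eq_of_le hvle with hlt | heq
  · rw [if_pos hlt]
    by_cases hc : List.count v (x :: xs) < 6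
    · rw [if_pos hc, if_pos (show ((List.count v (x :: xs) : Int)) < 6 by exact_mod_cast hc)]
    · rw [if_neg hc, if_neg (show ¬ ((List.count v (x :: xs) : Int)) < 6 by exact_mod_cast hc)]
      simp
  · subst heq
    rw [if_neg (lt_irrefl v), if_pos List.mem_cons_self]
    have h0 : PySem.List.index? (v :: xs) v = some 0 := PySem.List.index?_cons_self _ _
    simp only [PySem.List.index?_eq_idxOf?] at h0
    by_cases hc : List.count v (v :: xs) < 6
    · rw [if_pos hc, if_pos (show (0 : Int) + (List.count v (v :: xs) : Int) < 6 by omega)]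
    · rw [if_neg hc, if_neg (show ¬ ((0 : Int) + (List.count v (v :: xs) : Int) < 6) by omega)]
      simp [h0]

-- ===== VERDICT (by name: the statement is the Claim_ definition above) =====
theorem getIDX_spec : Claim_equal_getIDX := by
  intro array _ hpre
  match array with
  | [] => exact absurd rfl hpre
  | x :: xs =>
    show getIDX (x :: xs) = getIDX_alt (x :: xs)
    rw [getIDX_char, getIDX_alt_char]
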